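-- pv_equiv track=rewrite | github.com/ohtostado/duperscooper | src/duperscooper/finder.py | _group_exact_duplicates
-- ===== SOURCE A (Python) =====
-- from collections import defaultdict
-- from typing import Dict, List, Optional, Union
--
-- def _group_exact_duplicates(
--     file_fingerprints: List[tuple]
-- ) -> Dict[str, List[tuple]]:
--     """
--     Group files by exact hash match.
--
--     Returns:
--         Dict mapping hash to list of (file_path, hash) tuples
--     """
--     hash_to_files: Dict[str, List[tuple]] = defaultdict(list)
--     for file_path, file_hash in file_fingerprints:
--         hash_to_files[file_hash].append((file_path, file_hash))
--
--     # Filter to only duplicates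
--     return {
--         hash_val: file_list
--         for hash_val, file_list in hash_to_files.items()
--         if len(file_list) > 1
--     }
-- ===== SOURCE B (Python) =====
-- from typing import Dict, List
--
-- def _group_exact_duplicates(
--     file_fingerprints: List[tuple]
-- ) -> Dict[str, List[tuple]]:
--     """For each first occurrence of a hash, scan the whole list for its group;
--     keep the group only if it has more than one member. No bucketing dict."""
--     result: Dict[str, List[tuple]] = {}
--     seen: List[str] = []
--     for _path, file_hash in file_fingerprints:
--         if file_hash in seen:
--             continue
--         seen.append(file_hash)
--         group = [(p, h) for p, h in file_fingerprints if h == file_hash]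
--         if len(group) > 1:
--             result[file_hash] = group
--     return result
-- ===== Notes on version B (the rewrite author's own statement) =====
-- stated objective: alternative
-- what changed: A buckets every file into a defaultdict in one pass and then filters buckets by length; B uses no bucketing at all: it keeps a 'seen' list of hashes and, at each first occurrence of a hash, runs a fresh nested scan of the whole input to collect that hash's group, emitting it only if it has more than one member.
import Mathlib
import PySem

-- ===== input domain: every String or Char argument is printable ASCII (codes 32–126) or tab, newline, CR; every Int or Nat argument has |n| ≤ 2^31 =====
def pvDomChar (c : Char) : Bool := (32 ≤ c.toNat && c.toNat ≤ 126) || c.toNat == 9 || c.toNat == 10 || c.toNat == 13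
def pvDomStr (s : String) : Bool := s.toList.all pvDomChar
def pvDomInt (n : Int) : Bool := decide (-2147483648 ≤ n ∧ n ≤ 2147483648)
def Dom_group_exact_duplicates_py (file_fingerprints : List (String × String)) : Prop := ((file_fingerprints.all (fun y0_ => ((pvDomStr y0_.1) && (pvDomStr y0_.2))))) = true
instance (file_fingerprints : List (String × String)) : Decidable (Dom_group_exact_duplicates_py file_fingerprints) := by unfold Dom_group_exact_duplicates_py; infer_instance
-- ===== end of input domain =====

-- B replaces A's bucket-everything-then-filter with a seen-list plus a nested scan per first-seen hash (alternative decomposition, no bucketing dict).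

-- ===== PORT A =====
-- defaultdict(list) bucketing, then dict comprehension keeping lists of length > 1
def group_exact_duplicates_py (file_fingerprints : List (String × String)) : List (String × List (String × String)) :=
  let hash_to_files : PySem.Dict String (List (String × String)) :=
    file_fingerprints.foldl (fun d p => d.modify p.2 [] (· ++ [(p.1, p.2)])) PySem.Dict.empty
  hash_to_files.items.filter (fun kv => decide (1 < kv.2.length))

-- ===== PORT B =====
-- seen list of hashes; at each first occurrence, a nested scan of the whole input collects the group, kept if len > 1
def group_exact_duplicates_py_alt (file_fingerprints : List (String × String)) : List (String × List (String × String)) :=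
  let st :=
    file_fingerprints.foldl
      (fun (st : PySem.Dict String (List (String × String)) × List String) p =>
        if st.2.contains p.2 then st
        else
          let group := file_fingerprints.filter (fun q => q.2 == p.2)
          ((if 1 < group.length then st.1.insert p.2 group else st.1), st.2 ++ [p.2]))
      (PySem.Dict.empty, [])
  st.1.items

-- ===== PRECONDITION & SPEC =====
def Spec_group_exact_duplicates_py (file_fingerprints : List (String × String)) (out : List (String × List (String × String))) : Prop := out = group_exact_duplicates_py_alt file_fingerprints
instance (file_fingerprints : List (String × String)) (out : List (String × List (String × String))) : Decidable (Spec_group_exact_duplicates_py file_fingerprints out) := by unfold Spec_group_exact_duplicates_py; infer_instance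

-- ===== CLAIM =====
def Claim_equal_group_exact_duplicates_py : Prop := ∀ (file_fingerprints : List (String × String)), Dom_group_exact_duplicates_py file_fingerprints → Spec_group_exact_duplicates_py file_fingerprints (group_exact_duplicates_py file_fingerprints)

-- ===== LEMMAS AND PROOFS =====

-- getD of the A-style grouping fold: it concatenates the matching pairs
theorem pv_getD_buckets (l : List (String × String))
    (d : PySem.Dict String (List (String × String))) (c : String) :
    (l.foldl (fun d p => d.modify p.2 [] (· ++ [(p.1, p.2)])) d).getD c [] =
      d.getD c [] ++ (l.filter (fun p => p.2 == c)).map (fun p => (p.1, p.2)) := by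
  have h : l.foldl (fun d p => d.modify p.2 [] (· ++ [(p.1, p.2)])) d =
      (l.map (fun p => (p.2, (p.1, p.2)))).foldl (fun d q => d.modify q.1 [] (· ++ [q.2])) d := by
    rw [List.foldl_map]
  rw [h, PySem.Dict.getD_foldl_modify_append, List.filter_map, List.map_map]
  rfl

theorem pv_keys_buckets (l : List (String × String)) :
    (l.foldl (fun d p => d.modify p.2 [] (· ++ [(p.1, p.2)])) (PySem.Dict.empty : PySem.Dict String (List (String × String)))).keys =
      PySem.Set.ofList (l.map Prod.snd) := by
  rw [PySem.Dict.keys_foldl_modify_key (key := Prod.snd)]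
  simp [PySem.Dict.keys_empty, PySem.Set.update_nil_left]

theorem pv_nodup_keys_buckets (l : List (String × String)) :
    (l.foldl (fun d p => d.modify p.2 [] (· ++ [(p.1, p.2)])) (PySem.Dict.empty : PySem.Dict String (List (String × String)))).keys.Nodup := by
  exact PySem.Dict.nodup_keys_foldl_modify_key l Prod.snd [] _ _ (by simp [PySem.Dict.keys_empty])

-- items of the A-style grouping fold from empty, as map over the deduped hashes
theorem pv_items_buckets (l : List (String × String)) :
    (l.foldl (fun d p => d.modify p.2 [] (· ++ [(p.1, p.2)])) (PySem.Dict.empty : PySem.Dict String (List (String × String)))).items =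
      (PySem.Set.ofList (l.map Prod.snd)).map
        (fun k => (k, (l.filter (fun p => p.2 == k)).map (fun p => (p.1, p.2)))) := by
  rw [PySem.Dict.items_eq_map_keys _ (pv_nodup_keys_buckets l) [], pv_keys_buckets]
  refine List.map_congr_left (fun k _ => ?_)
  rw [pv_getD_buckets]
  simp [PySem.Dict.getD_empty]

-- invariant for B's seen-list loop: d mirrors the qualifying seen hashes, seen evolves as Set.update
theorem pv_alt_loop (fps : List (String × String)) :
    ∀ (l : List (String × String)) (seen : List String)
      (d : PySem.Dict String (List (String × String)))
      (hd : d.items = (seen.filter (fun k => decide (1 < (fps.filter (fun q => q.2 == k)).length))).map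
          (fun k => (k, fps.filter (fun q => q.2 == k)))),
      (l.foldl
        (fun (st : PySem.Dict String (List (String × String)) × List String) p =>
          if st.2.contains p.2 then st
          else
            let group := fps.filter (fun q => q.2 == p.2)
            ((if 1 < group.length then st.1.insert p.2 group else st.1), st.2 ++ [p.2]))
        (d, seen)).1.items =
      ((PySem.Set.update seen (l.map Prod.snd)).filter
          (fun k => decide (1 < (fps.filter (fun q => q.2 == k)).length))).map
        (fun k => (k, fps.filter (fun q => q.2 == k))) := by
  intro l
  induction l with
  | nil => intro seen d hd; simpa [PySem.Set.update] using hd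
  | cons p rest ih =>
    intro seen d hd
    by_cases hmem : p.2 ∈ seen
    · have hc : seen.contains p.2 = true := by simpa using hmem
      have hadd : PySem.Set.add seen p.2 = seen := by
        simp [PySem.Set.add, PySem.Set.contains, hmem]
      simp only [PySem.Set.update] at *
      rw [List.foldl_cons, List.map_cons, List.foldl_cons, hadd]
      rw [if_pos (show ((d, seen).2).contains p.2 = true from hc)]
      exact ih seen d hd
    · have hc : seen.contains p.2 = false := by simpa using hmem
      have hadd : PySem.Set.add seen p.2 = seen ++ [p.2] := by
        simp [PySem.Set.add, PySem.Set.contains, hmem]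
      have hkeys : d.keys = seen.filter (fun k => decide (1 < (fps.filter (fun q => q.2 == k)).length)) := by
        have : d.keys = d.items.map Prod.fst := by simp [PySem.Dict.keys]
        rw [this, hd, List.map_map]
        simp [Function.comp_def]
      have hnotkey : d.contains p.2 = false := by
        by_contra h
        have hcont : d.contains p.2 = true := by
          cases hcc : d.contains p.2 with
          | false => exact absurd hcc h
          | true => rfl
        have : p.2 ∈ d.keys := (PySem.Dict.contains_iff_mem_keys d p.2).1 hcont
        rw [hkeys] at this
        exact hmem (List.mem_filter.1 this).1
      simp only [List.foldl_cons, hc, Bool.false_eq_true, PySem.Set.update]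
      by_cases hq : 1 < (fps.filter (fun q => q.2 == p.2)).length
      · have hd' : (d.insert p.2 (fps.filter (fun q => q.2 == p.2))).items =
            ((seen ++ [p.2]).filter (fun k => decide (1 < (fps.filter (fun q => q.2 == k)).length))).map
              (fun k => (k, fps.filter (fun q => q.2 == k))) := by
          rw [PySem.Dict.items_insert, hnotkey, hd, List.filter_append, List.map_append]
          simp [hq]
        have := ih (seen ++ [p.2]) (d.insert p.2 (fps.filter (fun q => q.2 == p.2))) hd'
        simpa [hq, PySem.Set.update, hadd] using this
      · have hd' : d.items =
            ((seen ++ [p.2]).filter (fun k => decide (1 < (fps.filter (fun q => q.2 == k)).length))).map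
              (fun k => (k, fps.filter (fun q => q.2 == k))) := by
          rw [hd, List.filter_append]
          simp [hq]
        have := ih (seen ++ [p.2]) d hd'
        simpa [hq, PySem.Set.update, hadd] using this

-- ===== VERDICT =====
theorem group_exact_duplicates_py_spec : Claim_equal_group_exact_duplicates_py := by
  intro fps _
  unfold Spec_group_exact_duplicates_py group_exact_duplicates_py group_exact_duplicates_py_alt
  simp only []
  rw [pv_items_buckets, List.filter_map, pv_alt_loop fps fps [] PySem.Dict.empty (by rfl)]
  rw [PySem.Set.update_nil_left]
  simp [Function.comp_def]
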